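-- pv_equiv track=rewrite | github.com/spegeerino/projects | Project Euler/projeuler250.py | poly_power
-- ===== SOURCE A (Python) =====
-- mod = 10 ** 16
--
-- def poly_times(p, q):
--     out_len = min(250, len(p) + len(q) - 1)
--     out = [0] * out_len
--     for i in range(len(p)):
--         for j in range(len(q)):
--             index = (i + j) % 250
--             out[index] += (p[i] * q[j]) % mod
--             out[index] %= mod
--     return out
--
-- poly_square = lambda p: poly_times(p,p)
--
-- def poly_power(p, exp):
--     mul_poly = p
--     out = [1]
--     while exp > 0:
--         if exp % 2 == 1:
--             out = poly_times(out,mul_poly)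
--         exp //= 2
--         mul_poly = poly_square(mul_poly)
--     return out
-- ===== SOURCE B (Python) =====
-- mod = 10 ** 16
--
-- def poly_times(p, q):
--     out_len = min(250, len(p) + len(q) - 1)
--     out = [0] * out_len
--     for i in range(len(p)):
--         for j in range(len(q)):
--             index = (i + j) % 250
--             out[index] += (p[i] * q[j]) % mod
--             out[index] %= mod
--     return out
--
-- def poly_power(p, exp):
--     if exp <= 0:
--         return [1]
--     half = poly_power(p, exp // 2)
--     sq = poly_times(half, half)
--     if exp % 2 == 1:
--         return poly_times(sq, p)
--     return sq
-- ===== Notes on version B (the rewrite author's own statement) =====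
-- stated objective: alternative
-- what changed: poly_power is rewritten as top-down recursion that squares the recursively computed half-power ((p^(exp//2))^2, times p when exp is odd) instead of A's bottom-up while-loop that scans the bits of exp, repeatedly squares the base polynomial and multiplies it into an accumulator at each set bit.
import Mathlib
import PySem

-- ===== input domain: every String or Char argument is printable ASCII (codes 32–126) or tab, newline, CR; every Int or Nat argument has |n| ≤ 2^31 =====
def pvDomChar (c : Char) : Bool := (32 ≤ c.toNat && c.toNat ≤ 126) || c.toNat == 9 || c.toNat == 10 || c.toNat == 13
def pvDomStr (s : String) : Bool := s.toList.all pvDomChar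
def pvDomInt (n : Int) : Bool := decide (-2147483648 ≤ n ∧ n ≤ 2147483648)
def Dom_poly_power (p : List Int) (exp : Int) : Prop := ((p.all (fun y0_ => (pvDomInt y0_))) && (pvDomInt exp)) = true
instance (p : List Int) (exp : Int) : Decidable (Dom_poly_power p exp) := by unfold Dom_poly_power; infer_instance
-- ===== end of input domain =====

-- B computes poly_power by top-down recursion (square the half-power, times p when exp is odd)
-- instead of A's bottom-up bit-scanning loop that squares the base; poly_times is unchanged.

-- ===== PORT A =====
-- poly_times: the module helper (cyclic convolution mod 10^16, output length min(250, len p + len q - 1)).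
-- Indices: i < len p, j < len q and (i+j) % 250 < out length always hold, so getD/set are exact here.
def polyTimes (p q : List Int) : List Int :=
  (List.range p.length).foldl (fun out i =>
    (List.range q.length).foldl (fun out j =>
      let index := (i + j) % 250
      let out1 := out.set index (out.getD index 0 +
        PySem.Int.mod (p.getD i 0 * q.getD j 0) 10000000000000000)
      out1.set index (PySem.Int.mod (out1.getD index 0) 10000000000000000)) out)
    (List.replicate (min 250 ((p.length : Int) + (q.length : Int) - 1)).toNat 0)

-- poly_square = lambda p: poly_times(p, p)
def polySquare (p : List Int) : List Int := polyTimes p p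

-- the 'while exp > 0' loop of A
def polyPowLoop (mul_poly out : List Int) (exp : Int) : List Int :=
  if _h : 0 < exp then
    polyPowLoop (polySquare mul_poly)
      (if PySem.Int.mod exp 2 = 1 then polyTimes out mul_poly else out)
      (PySem.Int.floordiv exp 2)
  else out
termination_by exp.toNat
decreasing_by
  rw [PySem.Int.floordiv_eq_ediv_of_pos (by omega : (0:ℤ) < 2)]
  omega

def poly_power (p : List Int) (exp : Int) : List Int := polyPowLoop p [1] exp

-- ===== PORT B =====
-- top-down recursion: p^exp = (p^(exp//2))^2, times p when exp is odd; exp <= 0 gives [1]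
def poly_power_alt (p : List Int) (exp : Int) : List Int :=
  if _h : exp ≤ 0 then [1]
  else
    let half := poly_power_alt p (PySem.Int.floordiv exp 2)
    let sq := polyTimes half half
    if PySem.Int.mod exp 2 = 1 then polyTimes sq p else sq
termination_by exp.toNat
decreasing_by
  rw [PySem.Int.floordiv_eq_ediv_of_pos (by omega : (0:ℤ) < 2)]
  omega

-- ===== PRECONDITION & SPEC =====
def Spec_poly_power (p : List Int) (exp : Int) (out : List Int) : Prop := out = poly_power_alt p exp
instance (p : List Int) (exp : Int) (out : List Int) : Decidable (Spec_poly_power p exp out) := by unfold Spec_poly_power; infer_instance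

-- ===== CLAIM (what is proved, stated in full; the proofs are below) =====
def Claim_equal_poly_power : Prop := ∀ (p : List Int) (exp : Int), Dom_poly_power p exp → Spec_poly_power p exp (poly_power p exp)

-- ===== LEMMAS AND PROOFS =====

-- The semantic ring: coefficients in ZMod 10^16, exponents cyclic in ZMod 250 (a commutative semiring).
abbrev Rng := AddMonoidAlgebra (ZMod 10000000000000000) (ZMod 250)

-- semantics of a coefficient list
noncomputable def phi (p : List Int) : Rng :=
  ∑ i ∈ Finset.range p.length,
    AddMonoidAlgebra.single ((i : ZMod 250)) ((p.getD i 0 : ZMod 10000000000000000))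

-- canonical list of a ring element at a given length
noncomputable def canon (L : ℕ) (f : Rng) : List Int :=
  (List.range L).map (fun k : ℕ => (((f ((Nat.cast k : ZMod 250))).val : ℕ) : ℤ))

-- resulting length of poly_times
def tlen (a b : ℕ) : ℕ := min 250 (a + b - 1)

-- the support of f lies under the first L indices
def good (L : ℕ) (f : Rng) : Prop := ∀ g : ZMod 250, f g ≠ 0 → ∃ k, k < L ∧ (k : ZMod 250) = g

theorem canon_length (L : ℕ) (f : Rng) : (canon L f).length = L := by simp [canon]

theorem canon_getD (L : ℕ) (f : Rng) (k : ℕ) (hk : k < L) :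
    (canon L f).getD k 0 = (((f (k : ZMod 250)).val : ℕ) : ℤ) := by
  unfold canon
  rw [List.getD_eq_getElem?_getD, List.getElem?_map, List.getElem?_range hk]
  rfl

theorem tlen_le (a b : ℕ) : tlen a b ≤ 250 := Nat.min_le_left _ _

-- one entry update of the nested loop body
def pstep (p q : List Int) (out : List Int) (ij : ℕ × ℕ) : List Int :=
  let index := (ij.1 + ij.2) % 250
  let out1 := out.set index (out.getD index 0 +
    PySem.Int.mod (p.getD ij.1 0 * q.getD ij.2 0) 10000000000000000)
  out1.set index (PySem.Int.mod (out1.getD index 0) 10000000000000000)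

def pairsL (a b : ℕ) : List (ℕ × ℕ) :=
  (List.range a).flatMap (fun i => (List.range b).map (fun j => (i, j)))

def pairSum (p q : List Int) (ps : List (ℕ × ℕ)) (k : ℕ) : ℤ :=
  (ps.map (fun ij => if (ij.1 + ij.2) % 250 = k then p.getD ij.1 0 * q.getD ij.2 0 else 0)).sum

theorem polyTimes_eq_pairs (p q : List Int) :
    polyTimes p q = (pairsL p.length q.length).foldl (pstep p q)
      (List.replicate (min 250 ((p.length : Int) + (q.length : Int) - 1)).toNat 0) := by
  unfold polyTimes pairsL pstep
  rw [List.foldl_flatMap]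
  simp only [List.foldl_map]

theorem getD_set_ite (xs : List ℤ) (i v : _) (k : ℕ) (hi : i < xs.length) :
    (xs.set i v).getD k 0 = if i = k then v else xs.getD k 0 := by
  rcases eq_or_ne i k with rfl|hne
  · simp [List.getD_eq_getElem?_getD, hi]
  · simp [List.getD_eq_getElem?_getD, List.getElem?_set_ne hne, hne]

theorem pstep_length (p q out : List Int) (ij : ℕ × ℕ) : (pstep p q out ij).length = out.length := by
  simp [pstep]

theorem pstep_getD (p q out : List Int) (ij : ℕ × ℕ)
    (hidx : (ij.1 + ij.2) % 250 < out.length) (k : ℕ) :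
    (pstep p q out ij).getD k 0 =
      if (ij.1 + ij.2) % 250 = k then
        (out.getD ((ij.1 + ij.2) % 250) 0 + (p.getD ij.1 0 * q.getD ij.2 0) % 10000000000000000)
          % 10000000000000000
      else out.getD k 0 := by
  unfold pstep
  simp only [PySem.Int.mod_eq_emod_of_pos (by norm_num : (0:ℤ) < 10000000000000000)]
  rw [getD_set_ite _ _ _ k (by simpa using hidx)]
  rw [getD_set_ite _ _ _ ((ij.1 + ij.2) % 250) hidx, if_pos rfl]
  rcases eq_or_ne ((ij.1 + ij.2) % 250) k with hk | hne
  · rw [if_pos hk, if_pos hk]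
  · rw [if_neg hne, if_neg hne]
    rw [getD_set_ite _ _ _ k hidx, if_neg hne]

theorem fold_pairs (p q : List Int) : ∀ (ps : List (ℕ × ℕ)) (out : List Int) (G : ℕ → ℤ),
    (∀ ij ∈ ps, (ij.1 + ij.2) % 250 < out.length) →
    (∀ k, k < out.length → out.getD k 0 = (G k) % 10000000000000000) →
    (ps.foldl (pstep p q) out).length = out.length ∧
    ∀ k, k < out.length →
      (ps.foldl (pstep p q) out).getD k 0 = (G k + pairSum p q ps k) % 10000000000000000 := by
  intro ps
  induction ps with
  | nil => intro out G _ hinv; simpa [pairSum] using hinv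
  | cons ij ps ih =>
    intro out G hmem hinv
    have hidx : (ij.1 + ij.2) % 250 < out.length := hmem ij (by simp)
    have hlen : (pstep p q out ij).length = out.length := pstep_length p q out ij
    have hstep : ∀ k, k < out.length → (pstep p q out ij).getD k 0 =
        (G k + (if (ij.1 + ij.2) % 250 = k then p.getD ij.1 0 * q.getD ij.2 0 else 0))
          % 10000000000000000 := by
      intro k hk
      rw [pstep_getD p q out ij hidx k]
      rcases eq_or_ne ((ij.1 + ij.2) % 250) k with rfl|hne
      · rw [if_pos rfl, if_pos rfl, hinv _ hk]
        omega
      · rw [if_neg hne, if_neg hne, hinv _ hk, add_zero]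
    have := ih (pstep p q out ij)
      (fun k => G k + (if (ij.1 + ij.2) % 250 = k then p.getD ij.1 0 * q.getD ij.2 0 else 0))
      (by intro x hx; rw [hlen]; exact hmem x (by simp [hx]))
      (by intro k hk; rw [hlen] at hk; exact hstep k hk)
    refine ⟨by rw [List.foldl_cons, this.1, hlen], ?_⟩
    intro k hk
    rw [List.foldl_cons, this.2 k (by rw [hlen]; exact hk)]
    show ((G k + (if (ij.1 + ij.2) % 250 = k then p.getD ij.1 0 * q.getD ij.2 0 else 0))
        + pairSum p q ps k) % 10000000000000000 = _
    have : pairSum p q (ij :: ps) k =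
        (if (ij.1 + ij.2) % 250 = k then p.getD ij.1 0 * q.getD ij.2 0 else 0) + pairSum p q ps k := by
      simp [pairSum]
    rw [this]
    omega

theorem sum_map_range_eq (f : ℕ → ℤ) (n : ℕ) :
    ((List.range n).map f).sum = ∑ i ∈ Finset.range n, f i := by
  induction n with
  | zero => simp
  | succ n ih => rw [List.range_succ]; simp [Finset.sum_range_succ, ih]

theorem pairSum_full (p q : List Int) (a b k : ℕ) :
    pairSum p q (pairsL a b) k =
      ∑ i ∈ Finset.range a, ∑ j ∈ Finset.range b,
        (if (i + j) % 250 = k then p.getD i 0 * q.getD j 0 else 0) := by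
  induction a with
  | zero => simp [pairSum, pairsL]
  | succ a ih =>
    have hsplit : pairsL (a+1) b = pairsL a b ++ (List.range b).map (fun j => (a, j)) := by
      unfold pairsL
      rw [List.range_succ, List.flatMap_append]
      simp
    rw [hsplit]
    unfold pairSum
    rw [List.map_append, List.sum_append]
    unfold pairSum at ih
    rw [ih, Finset.sum_range_succ, List.map_map]
    have hcomp : ((fun ij : ℕ × ℕ => if (ij.1 + ij.2) % 250 = k then p.getD ij.1 0 * q.getD ij.2 0 else 0)
        ∘ (fun j => (a, j))) = fun j => if (a + j) % 250 = k then p.getD a 0 * q.getD j 0 else 0 := rfl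
    rw [hcomp, sum_map_range_eq]

theorem mul_phi_apply (p q : List Int) (g : ZMod 250) :
    (phi p * phi q) g =
      ∑ i ∈ Finset.range p.length, ∑ j ∈ Finset.range q.length,
        (if ((i : ZMod 250) + (j : ZMod 250) = g)
          then ((p.getD i 0 : ZMod 10000000000000000) * (q.getD j 0 : ZMod 10000000000000000))
          else 0) := by
  have h0 : phi p * phi q = ∑ i ∈ Finset.range p.length, ∑ j ∈ Finset.range q.length,
      AddMonoidAlgebra.single ((i : ZMod 250) + (j : ZMod 250))
        ((p.getD i 0 : ZMod 10000000000000000) * (q.getD j 0 : ZMod 10000000000000000)) := by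
    unfold phi
    rw [Finset.sum_mul_sum]
    refine Finset.sum_congr rfl fun i _ => Finset.sum_congr rfl fun j _ => ?_
    rw [AddMonoidAlgebra.single_mul_single]
  rw [h0]
  refine (Finsupp.finset_sum_apply _ _ _).trans (Finset.sum_congr rfl fun i _ => ?_)
  refine (Finsupp.finset_sum_apply _ _ _).trans (Finset.sum_congr rfl fun j _ => ?_)
  exact Finsupp.single_apply

theorem cond_bridge (i j k : ℕ) (hk : k < 250) :
    (((i : ZMod 250) + (j : ZMod 250) = (k : ZMod 250))) ↔ ((i + j) % 250 = k) := by
  rw [← Nat.cast_add, ZMod.natCast_eq_natCast_iff]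
  unfold Nat.ModEq
  rw [Nat.mod_eq_of_lt hk]

theorem polyTimes_canon (p q : List Int) :
    polyTimes p q = canon (tlen p.length q.length) (phi p * phi q) := by
  haveI : NeZero (10000000000000000 : ℕ) := ⟨by norm_num⟩
  have hlen0 : (List.replicate (min 250 ((p.length : Int) + (q.length : Int) - 1)).toNat (0:ℤ)).length
      = tlen p.length q.length := by
    rw [List.length_replicate]; unfold tlen; omega
  have hmem : ∀ ij ∈ pairsL p.length q.length,
      (ij.1 + ij.2) % 250 < (List.replicate (min 250 ((p.length : Int) + (q.length : Int) - 1)).toNat (0:ℤ)).length := by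
    intro ij hij
    have : ij.1 < p.length ∧ ij.2 < q.length := by
      unfold pairsL at hij
      simp only [List.mem_flatMap, List.mem_map, List.mem_range] at hij
      obtain ⟨i, hi, j, hj, rfl⟩ := hij
      exact ⟨hi, hj⟩
    rw [hlen0]; unfold tlen; omega
  have hbase : ∀ k, k < (List.replicate (min 250 ((p.length : Int) + (q.length : Int) - 1)).toNat (0:ℤ)).length →
      (List.replicate (min 250 ((p.length : Int) + (q.length : Int) - 1)).toNat (0:ℤ)).getD k 0
        = ((0:ℤ)) % 10000000000000000 := by
    intro k hk
    rw [List.getD_eq_getElem _ _ hk]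
    simp
  have main := fold_pairs p q (pairsL p.length q.length) _ (fun _ => 0) hmem hbase
  rw [polyTimes_eq_pairs]
  refine List.ext_getElem (by rw [main.1, hlen0, canon_length]) ?_
  intro k hk1 hk2
  rw [canon_length] at hk2
  have hk2c : k < (canon (tlen p.length q.length) (phi p * phi q)).length := by
    rw [canon_length]; exact hk2
  rw [← List.getD_eq_getElem _ 0 hk1, ← List.getD_eq_getElem _ 0 hk2c]
  rw [main.2 k (by rw [hlen0]; exact hk2), canon_getD _ _ _ hk2, zero_add]
  rw [pairSum_full]
  have hk250 : k < 250 := lt_of_lt_of_le hk2 (tlen_le _ _)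
  rw [mul_phi_apply]
  have hcast : (∑ i ∈ Finset.range p.length, ∑ j ∈ Finset.range q.length,
        (if ((i : ZMod 250) + (j : ZMod 250) = (k : ZMod 250))
          then ((p.getD i 0 : ZMod 10000000000000000) * (q.getD j 0 : ZMod 10000000000000000))
          else 0)) =
      (((∑ i ∈ Finset.range p.length, ∑ j ∈ Finset.range q.length,
        (if (i + j) % 250 = k then p.getD i 0 * q.getD j 0 else 0)) : ℤ) : ZMod 10000000000000000) := by
    push_cast
    refine Finset.sum_congr rfl fun i _ => Finset.sum_congr rfl fun j _ => ?_
    simp only [cond_bridge i j k hk250]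
  simp only [hcast, ZMod.val_intCast]
  omega

theorem good_phi (p : List Int) : good p.length (phi p) := by
  intro g hg
  by_contra hcon
  push Not at hcon
  apply hg
  unfold phi
  refine (Finsupp.finset_sum_apply _ _ _).trans (Finset.sum_eq_zero fun i hi => ?_)
  rw [Finsupp.single_apply, if_neg (hcon i (List.mem_range.mp (by simpa using hi)))]

theorem good_mul {f g : Rng} {a b : ℕ} (hf : good a f) (hg : good b g) :
    good (tlen a b) (f * g) := by
  intro x hx
  rw [AddMonoidAlgebra.mul_apply] at hx
  rw [Finsupp.sum] at hx
  obtain ⟨a1, ha1, h1⟩ := Finset.exists_ne_zero_of_sum_ne_zero hx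
  rw [Finsupp.sum] at h1
  obtain ⟨a2, ha2, h2⟩ := Finset.exists_ne_zero_of_sum_ne_zero h1
  have hcond : a1 + a2 = x := by
    by_contra hc
    rw [if_neg hc] at h2
    exact h2 rfl
  obtain ⟨i, hi, hi2⟩ := hf a1 (Finsupp.mem_support_iff.mp ha1)
  obtain ⟨j, hj, hj2⟩ := hg a2 (Finsupp.mem_support_iff.mp ha2)
  have hx2 : ((i + j : ℕ) : ZMod 250) = x := by
    rw [Nat.cast_add, hi2, hj2, hcond]
  by_cases hbig : 250 ≤ a + b - 1
  · refine ⟨(i + j) % 250, by unfold tlen; omega, ?_⟩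
    rw [← hx2]
    exact (ZMod.natCast_eq_natCast_iff _ _ _).mpr (Nat.mod_modEq _ _)
  · exact ⟨i + j, by unfold tlen; omega, hx2⟩

theorem phi_canon {L : ℕ} {f : Rng} (hL : L ≤ 250) (hgood : good L f) :
    phi (canon L f) = f := by
  haveI : NeZero (10000000000000000 : ℕ) := ⟨by norm_num⟩
  have h1 : phi (canon L f) = ∑ k ∈ Finset.range L, AddMonoidAlgebra.single (k : ZMod 250) (f (k : ZMod 250)) := by
    unfold phi
    rw [canon_length]
    refine Finset.sum_congr rfl fun k hk => ?_
    rw [canon_getD _ _ _ (List.mem_range.mp hk)]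
    congr 1
    push_cast
    rw [ZMod.natCast_val, ZMod.cast_id]
  rw [h1]
  refine Finsupp.ext fun x => ?_
  refine (Finsupp.finset_sum_apply _ _ _).trans ?_
  by_cases hx : ∃ k0, k0 < L ∧ (k0 : ZMod 250) = x
  · obtain ⟨k0, hk0, hk0x⟩ := hx
    rw [Finset.sum_eq_single_of_mem k0 (Finset.mem_range.mpr hk0)]
    · rw [Finsupp.single_apply, if_pos hk0x, hk0x]
    · intro k hk hne
      rw [Finsupp.single_apply, if_neg]
      intro hc
      apply hne
      have h1 : ((k : ZMod 250)).val = k := ZMod.val_cast_of_lt (lt_of_lt_of_le (List.mem_range.mp (by simpa using hk)) hL)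
      have h2 : ((k0 : ZMod 250)).val = k0 := ZMod.val_cast_of_lt (lt_of_lt_of_le hk0 hL)
      rw [← h1, ← h2, hc, hk0x]
  · push Not at hx
    rw [Finset.sum_eq_zero]
    · by_contra hc
      obtain ⟨k, hk, hkx⟩ := hgood x (Ne.symm hc)
      exact hx k hk hkx
    · intro k hk
      rw [Finsupp.single_apply, if_neg (hx k (List.mem_range.mp (by simpa using hk)))]

theorem canon_one : canon 1 (1 : Rng) = [1] := by
  haveI : Fact (1 < (10000000000000000 : ℕ)) := ⟨by norm_num⟩
  have h0 : ((1 : Rng) ((0:ℕ) : ZMod 250)) = 1 := by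
    rw [AddMonoidAlgebra.one_def, Nat.cast_zero, Finsupp.single_apply, if_pos rfl]
  have h1 : (canon 1 (1 : Rng)).getD 0 0 = (1:ℤ) := by
    rw [canon_getD _ _ _ (by omega), h0, ZMod.val_one]
    rfl
  refine List.ext_getElem (by rw [canon_length]; rfl) (fun k hk1 hk2 => ?_)
  have hk0 : k = 0 := by
    have := hk1
    rw [canon_length] at this
    omega
  subst hk0
  rw [← List.getD_eq_getElem _ 0 hk1, ← List.getD_eq_getElem _ 0 hk2, h1]
  rfl

theorem good_one : good 1 (1 : Rng) := by
  intro g hg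
  refine ⟨0, Nat.zero_lt_one, ?_⟩
  rw [AddMonoidAlgebra.one_def, Finsupp.single_apply] at hg
  rw [Nat.cast_zero]
  by_contra hc
  rw [if_neg hc] at hg
  exact hg rfl

theorem pow_glue (F x : Rng) (b h : ℕ) : F * x ^ b * (x * x) ^ h = F * x ^ (b + 2 * h) := by
  rw [show x * x = x ^ 2 by ring, ← pow_mul]
  ring

-- length recursion mirroring A's loop
def resL (L m : ℕ) (e : ℤ) : ℕ :=
  if _h : 0 < e then
    resL (if PySem.Int.mod e 2 = 1 then tlen L m else L) (tlen m m) (PySem.Int.floordiv e 2)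
  else L
termination_by e.toNat
decreasing_by
  rw [PySem.Int.floordiv_eq_ediv_of_pos (by omega : (0:ℤ) < 2)]
  omega

-- length recursion mirroring B's recursion
def resBB (np : ℕ) (e : ℤ) : ℕ :=
  if _h : e ≤ 0 then 1
  else
    let half := resBB np (PySem.Int.floordiv e 2)
    let sq := tlen half half
    if PySem.Int.mod e 2 = 1 then tlen sq np else sq
termination_by e.toNat
decreasing_by
  rw [PySem.Int.floordiv_eq_ediv_of_pos (by omega : (0:ℤ) < 2)]
  omega

theorem loopA_canon : ∀ (n : ℕ) (e : ℤ), e.toNat ≤ n → ∀ (mp : List Int) (L : ℕ) (F : Rng),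
    L ≤ 250 → good L F →
    polyPowLoop mp (canon L F) e = canon (resL L mp.length e) (F * phi mp ^ e.toNat) := by
  intro n
  induction n with
  | zero =>
    intro e he mp L F _ _
    rw [polyPowLoop, resL, dif_neg (by omega), dif_neg (by omega)]
    rw [show e.toNat = 0 by omega, pow_zero, mul_one]
  | succ n ih =>
    intro e he mp L F hL hgood
    by_cases hpos : 0 < e
    · rw [polyPowLoop, resL, dif_pos hpos, dif_pos hpos]
      have hdiv : (PySem.Int.floordiv e 2) = e / 2 :=
        PySem.Int.floordiv_eq_ediv_of_pos (by omega : (0:ℤ) < 2)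
      have hbound : (PySem.Int.floordiv e 2).toNat ≤ n := by rw [hdiv]; omega
      have hsq : polySquare mp = canon (tlen mp.length mp.length) (phi mp * phi mp) :=
        polyTimes_canon mp mp
      have hsqlen : (polySquare mp).length = tlen mp.length mp.length := by
        rw [hsq, canon_length]
      have hphisq : phi (polySquare mp) = phi mp * phi mp := by
        rw [hsq]
        exact phi_canon (tlen_le _ _) (good_mul (good_phi mp) (good_phi mp))
      have hmod : PySem.Int.mod e 2 = e % 2 := PySem.Int.mod_eq_emod_of_pos (by omega : (0:ℤ) < 2)
      by_cases hpar : PySem.Int.mod e 2 = 1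
      · rw [if_pos hpar, if_pos hpar]
        have hmul : polyTimes (canon L F) mp = canon (tlen L mp.length) (F * phi mp) := by
          rw [polyTimes_canon, canon_length, phi_canon hL hgood]
        rw [hmul]
        rw [ih _ hbound (polySquare mp) (tlen L mp.length) (F * phi mp) (tlen_le _ _)
          (good_mul hgood (good_phi mp))]
        rw [hsqlen, hphisq]
        congr 1
        have hE : e.toNat = 1 + 2 * (PySem.Int.floordiv e 2).toNat := by
          rw [hdiv]; rw [hmod] at hpar; omega
        rw [hE, ← pow_glue F (phi mp) 1 _, pow_one]
      · rw [if_neg hpar, if_neg hpar]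
        rw [ih _ hbound (polySquare mp) L F hL hgood]
        rw [hsqlen, hphisq]
        congr 1
        have hE : e.toNat = 0 + 2 * (PySem.Int.floordiv e 2).toNat := by
          rw [hdiv]; rw [hmod] at hpar
          have := Int.emod_two_eq e
          omega
        rw [hE, ← pow_glue F (phi mp) 0 _, pow_zero, mul_one]
    · rw [polyPowLoop, resL, dif_neg hpos, dif_neg hpos]
      rw [show e.toNat = 0 by omega, pow_zero, mul_one]

theorem altB_canon : ∀ (n : ℕ) (e : ℤ), e.toNat ≤ n → ∀ (p : List Int),
    poly_power_alt p e = canon (resBB p.length e) (phi p ^ e.toNat)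
      ∧ resBB p.length e ≤ 250 ∧ good (resBB p.length e) (phi p ^ e.toNat) := by
  intro n
  induction n with
  | zero =>
    intro e he p
    rw [poly_power_alt, resBB, dif_pos (by omega : e ≤ 0), dif_pos (by omega : e ≤ 0)]
    rw [show e.toNat = 0 by omega, pow_zero]
    exact ⟨canon_one.symm, by omega, good_one⟩
  | succ n ih =>
    intro e he p
    by_cases hle : e ≤ 0
    · rw [poly_power_alt, resBB, dif_pos hle, dif_pos hle]
      rw [show e.toNat = 0 by omega, pow_zero]
      exact ⟨canon_one.symm, by omega, good_one⟩
    · rw [poly_power_alt, resBB]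
      simp only [dif_neg hle]
      have hdiv : (PySem.Int.floordiv e 2) = e / 2 :=
        PySem.Int.floordiv_eq_ediv_of_pos (by omega : (0:ℤ) < 2)
      have hmod : PySem.Int.mod e 2 = e % 2 := PySem.Int.mod_eq_emod_of_pos (by omega : (0:ℤ) < 2)
      obtain ⟨ih1, ih2, ih3⟩ := ih (PySem.Int.floordiv e 2) (by rw [hdiv]; omega) p
      have hsq : polyTimes (poly_power_alt p (PySem.Int.floordiv e 2))
            (poly_power_alt p (PySem.Int.floordiv e 2))
          = canon (tlen (resBB p.length (PySem.Int.floordiv e 2)) (resBB p.length (PySem.Int.floordiv e 2)))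
              (phi p ^ (2 * (PySem.Int.floordiv e 2).toNat)) := by
        rw [ih1, polyTimes_canon, canon_length, phi_canon ih2 ih3, ← pow_add, two_mul]
      have hgsq : good (tlen (resBB p.length (PySem.Int.floordiv e 2)) (resBB p.length (PySem.Int.floordiv e 2)))
          (phi p ^ (2 * (PySem.Int.floordiv e 2).toNat)) := by
        rw [two_mul, pow_add]
        exact good_mul ih3 ih3
      by_cases hpar : PySem.Int.mod e 2 = 1
      · rw [if_pos hpar, if_pos hpar]
        have hE : e.toNat = 2 * (PySem.Int.floordiv e 2).toNat + 1 := by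
          rw [hdiv]; rw [hmod] at hpar; omega
        refine ⟨?_, tlen_le _ _, ?_⟩
        · rw [hsq, polyTimes_canon, canon_length, phi_canon (tlen_le _ _) hgsq]
          rw [hE, pow_succ]
        · rw [hE, pow_succ]
          exact good_mul hgsq (good_phi p)
      · rw [if_neg hpar, if_neg hpar]
        have hE : e.toNat = 2 * (PySem.Int.floordiv e 2).toNat := by
          rw [hdiv]; rw [hmod] at hpar
          have := Int.emod_two_eq e
          omega
        rw [hE]
        exact ⟨hsq, tlen_le _ _, hgsq⟩

-- ===== length arithmetic: A's and B's length recursions agree from the start state =====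
theorem resL_zero_zero : ∀ (n : ℕ) (e : ℤ), e.toNat ≤ n → resL 0 0 e = 0 := by
  intro n
  induction n with
  | zero => intro e he; rw [resL, dif_neg (by omega)]
  | succ n ih =>
    intro e he
    by_cases hpos : 0 < e
    · rw [resL, dif_pos hpos]
      have hdiv : (PySem.Int.floordiv e 2) = e / 2 :=
        PySem.Int.floordiv_eq_ediv_of_pos (by omega : (0:ℤ) < 2)
      have : tlen 0 0 = 0 := by unfold tlen; omega
      rw [this]
      rw [show (if PySem.Int.mod e 2 = 1 then 0 else 0) = 0 by simp]
      exact ih _ (by rw [hdiv]; omega)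
    · rw [resL, dif_neg hpos]

theorem resL_one_zero : ∀ (n : ℕ) (e : ℤ), e.toNat ≤ n → 0 < e → resL 1 0 e = 0 := by
  intro n
  induction n with
  | zero => intro e he hpos; omega
  | succ n ih =>
    intro e he hpos
    rw [resL, dif_pos hpos]
    have hdiv : (PySem.Int.floordiv e 2) = e / 2 :=
      PySem.Int.floordiv_eq_ediv_of_pos (by omega : (0:ℤ) < 2)
    have hmod : PySem.Int.mod e 2 = e % 2 := PySem.Int.mod_eq_emod_of_pos (by omega : (0:ℤ) < 2)
    have ht10 : tlen 1 0 = 0 := by unfold tlen; omega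
    have ht00 : tlen 0 0 = 0 := by unfold tlen; omega
    by_cases hpar : PySem.Int.mod e 2 = 1
    · rw [if_pos hpar, ht10, ht00]
      exact resL_zero_zero n _ (by rw [hdiv]; omega)
    · rw [if_neg hpar, ht00]
      rw [hmod] at hpar
      have := Int.emod_two_eq e
      exact ih _ (by rw [hdiv]; omega) (by rw [hdiv]; omega)

theorem resL_one : ∀ (n : ℕ) (e : ℤ), e.toNat ≤ n → ∀ (L : ℕ), 1 ≤ L → L ≤ 250 → resL L 1 e = L := by
  intro n
  induction n with
  | zero => intro e he L _ _; rw [resL, dif_neg (by omega)]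
  | succ n ih =>
    intro e he L hL1 hL2
    by_cases hpos : 0 < e
    · rw [resL, dif_pos hpos]
      have hdiv : (PySem.Int.floordiv e 2) = e / 2 :=
        PySem.Int.floordiv_eq_ediv_of_pos (by omega : (0:ℤ) < 2)
      have ht : tlen L 1 = L := by unfold tlen; omega
      have ht1 : tlen 1 1 = 1 := by unfold tlen; omega
      rw [ht, ht1]
      rw [show (if PySem.Int.mod e 2 = 1 then L else L) = L by simp]
      exact ih _ (by rw [hdiv]; omega) L hL1 hL2
    · rw [resL, dif_neg hpos]

theorem resL_big : ∀ (n : ℕ) (e : ℤ), e.toNat ≤ n → 1 ≤ e → ∀ (L m : ℕ),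
    1 ≤ L → L ≤ 250 → 2 ≤ m →
    resL L m e = min 250 (L + e.toNat * (m - 1)) := by
  intro n
  induction n with
  | zero => intro e he hpos; omega
  | succ n ih =>
    intro e he hpos L m hL1 hL2 hm1
    rw [resL, dif_pos (by omega)]
    have hdiv : (PySem.Int.floordiv e 2) = e / 2 :=
      PySem.Int.floordiv_eq_ediv_of_pos (by omega : (0:ℤ) < 2)
    have hmod : PySem.Int.mod e 2 = e % 2 := PySem.Int.mod_eq_emod_of_pos (by omega : (0:ℤ) < 2)
    by_cases he1 : e = 1
    · subst he1
      rw [show PySem.Int.mod 1 2 = 1 from rfl, if_pos rfl]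
      rw [show PySem.Int.floordiv 1 2 = 0 from rfl]
      rw [resL, dif_neg (by omega)]
      unfold tlen
      have : (1:ℤ).toNat = 1 := rfl
      rw [this]
      omega
    · -- e ≥ 2, so e / 2 ≥ 1
      have he2 : 2 ≤ e := by omega
      have hh : 1 ≤ e / 2 := by omega
      have hbound : (PySem.Int.floordiv e 2).toNat ≤ n := by rw [hdiv]; omega
      have htm2 : 2 ≤ tlen m m := by unfold tlen; omega
      have htm250 : tlen m m ≤ 250 := tlen_le _ _
      set h' := (PySem.Int.floordiv e 2).toNat with hh'
      have hh'1 : 1 ≤ h' := by rw [hh', hdiv]; omega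
      by_cases hpar : PySem.Int.mod e 2 = 1
      · rw [if_pos hpar]
        rw [ih _ hbound (by rw [hdiv]; omega) (tlen L m) (tlen m m)
          (by unfold tlen; omega) (tlen_le _ _) htm2]
        rw [hmod] at hpar
        have hE : e.toNat = 2 * h' + 1 := by rw [hh', hdiv]; omega
        rw [hE]
        unfold tlen
        have hx1 : (2 * h' + 1) * (m - 1) = 2 * (h' * (m - 1)) + (m - 1) := by ring
        by_cases hsm : 2 * m - 1 ≤ 250
        · have hmin : min 250 (m + m - 1) = 2 * m - 1 := by omega
          rw [hmin]
          have hx2 : h' * (2 * m - 1 - 1) = 2 * (h' * (m - 1)) := by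
            rw [show 2 * m - 1 - 1 = 2 * (m - 1) by omega]; ring
          rw [hx2, hx1]
          generalize h' * (m - 1) = X
          omega
        · have hmin : min 250 (m + m - 1) = 250 := by omega
          rw [hmin]
          have hge : 125 * h' ≤ h' * (m - 1) := by
            calc 125 * h' = h' * 125 := by ring
            _ ≤ h' * (m - 1) := Nat.mul_le_mul_left h' (by omega)
          rw [hx1]
          generalize hX : h' * (m - 1) = X at *
          omega
      · rw [if_neg hpar]
        rw [ih _ hbound (by rw [hdiv]; omega) L (tlen m m) hL1 hL2 htm2]
        rw [hmod] at hpar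
        have hpar0 : e % 2 = 0 := by have := Int.emod_two_eq e; omega
        have hE : e.toNat = 2 * h' := by rw [hh', hdiv]; omega
        rw [hE]
        unfold tlen
        have hx1 : (2 * h') * (m - 1) = 2 * (h' * (m - 1)) := by ring
        by_cases hsm : 2 * m - 1 ≤ 250
        · have hmin : min 250 (m + m - 1) = 2 * m - 1 := by omega
          rw [hmin]
          have hx2 : h' * (2 * m - 1 - 1) = 2 * (h' * (m - 1)) := by
            rw [show 2 * m - 1 - 1 = 2 * (m - 1) by omega]; ring
          rw [hx2, hx1]
        · have hmin : min 250 (m + m - 1) = 250 := by omega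
          rw [hmin]
          have hge : 125 * h' ≤ h' * (m - 1) := by
            calc 125 * h' = h' * 125 := by ring
            _ ≤ h' * (m - 1) := Nat.mul_le_mul_left h' (by omega)
          rw [hx1]
          generalize hX : h' * (m - 1) = X at *
          omega

theorem resBB_zero : ∀ (n : ℕ) (e : ℤ), e.toNat ≤ n → 0 < e → resBB 0 e = 0 := by
  intro n
  induction n with
  | zero => intro e he hpos; omega
  | succ n ih =>
    intro e he hpos
    rw [resBB]
    simp only [dif_neg (by omega : ¬ e ≤ 0)]
    have hdiv : (PySem.Int.floordiv e 2) = e / 2 :=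
      PySem.Int.floordiv_eq_ediv_of_pos (by omega : (0:ℤ) < 2)
    by_cases he1 : e = 1
    · subst he1
      rw [show PySem.Int.floordiv 1 2 = 0 from rfl]
      rw [resBB, dif_pos (by omega : (0:ℤ) ≤ 0)]
      rw [if_pos (show PySem.Int.mod 1 2 = 1 from rfl)]
      unfold tlen
      omega
    · rw [ih (PySem.Int.floordiv e 2) (by rw [hdiv]; omega) (by rw [hdiv]; omega)]
      split_ifs <;> (unfold tlen; omega)

theorem resBB_one : ∀ (n : ℕ) (e : ℤ), e.toNat ≤ n → resBB 1 e = 1 := by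
  intro n
  induction n with
  | zero => intro e he; rw [resBB, dif_pos (by omega : e ≤ 0)]
  | succ n ih =>
    intro e he
    by_cases hle : e ≤ 0
    · rw [resBB, dif_pos hle]
    · rw [resBB]
      simp only [dif_neg hle]
      have hdiv : (PySem.Int.floordiv e 2) = e / 2 :=
        PySem.Int.floordiv_eq_ediv_of_pos (by omega : (0:ℤ) < 2)
      rw [ih (PySem.Int.floordiv e 2) (by rw [hdiv]; omega)]
      split_ifs <;> (unfold tlen; omega)

theorem resBB_big : ∀ (n : ℕ) (e : ℤ), e.toNat ≤ n → 0 ≤ e → ∀ (np : ℕ), 2 ≤ np →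
    resBB np e = min 250 (1 + e.toNat * (np - 1)) := by
  intro n
  induction n with
  | zero =>
    intro e he h0 np hnp
    rw [resBB, dif_pos (by omega : e ≤ 0), show e.toNat = 0 by omega]
    norm_num
  | succ n ih =>
    intro e he h0 np hnp
    by_cases hle : e ≤ 0
    · rw [resBB, dif_pos hle, show e.toNat = 0 by omega]
      norm_num
    · rw [resBB]
      simp only [dif_neg hle]
      have hdiv : (PySem.Int.floordiv e 2) = e / 2 :=
        PySem.Int.floordiv_eq_ediv_of_pos (by omega : (0:ℤ) < 2)
      have hmod : PySem.Int.mod e 2 = e % 2 := PySem.Int.mod_eq_emod_of_pos (by omega : (0:ℤ) < 2)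
      rw [ih (PySem.Int.floordiv e 2) (by rw [hdiv]; omega) (by rw [hdiv]; omega) np hnp]
      by_cases hpar : PySem.Int.mod e 2 = 1
      · rw [if_pos hpar]
        have hE : e.toNat = 2 * (PySem.Int.floordiv e 2).toNat + 1 := by
          rw [hdiv]; rw [hmod] at hpar; omega
        rw [hE]
        unfold tlen
        rw [show (2 * (PySem.Int.floordiv e 2).toNat + 1) * (np - 1)
            = 2 * ((PySem.Int.floordiv e 2).toNat * (np - 1)) + (np - 1) by ring]
        generalize (PySem.Int.floordiv e 2).toNat * (np - 1) = X
        omega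
      · rw [if_neg hpar]
        have hE : e.toNat = 2 * (PySem.Int.floordiv e 2).toNat := by
          rw [hdiv]; rw [hmod] at hpar
          have := Int.emod_two_eq e
          omega
        rw [hE]
        unfold tlen
        rw [show (2 * (PySem.Int.floordiv e 2).toNat) * (np - 1)
            = 2 * ((PySem.Int.floordiv e 2).toNat * (np - 1)) by ring]
        generalize (PySem.Int.floordiv e 2).toNat * (np - 1) = X
        omega

theorem len_eq (e : ℤ) (np : ℕ) : resL 1 np e = resBB np e := by
  by_cases hpos : 0 < e
  · match np, (by omega : np = 0 ∨ np = 1 ∨ 2 ≤ np) with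
    | _, Or.inl rfl =>
      rw [resL_one_zero e.toNat e le_rfl hpos, resBB_zero e.toNat e le_rfl hpos]
    | _, Or.inr (Or.inl rfl) =>
      rw [resL_one e.toNat e le_rfl 1 le_rfl (by omega), resBB_one e.toNat e le_rfl]
    | np, Or.inr (Or.inr h2) =>
      rw [resL_big e.toNat e le_rfl (by omega) 1 np le_rfl (by omega) h2]
      rw [resBB_big e.toNat e le_rfl (by omega) np h2]
  · rw [resL, dif_neg hpos, resBB, dif_pos (by omega : e ≤ 0)]

-- ===== VERDICT (by name: the statement is the Claim_ definition above) =====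
theorem poly_power_spec : Claim_equal_poly_power := by
  unfold Claim_equal_poly_power
  intro p exp _
  unfold Spec_poly_power
  show polyPowLoop p [1] exp = poly_power_alt p exp
  rw [show ([1] : List Int) = canon 1 1 from canon_one.symm]
  rw [loopA_canon exp.toNat exp le_rfl p 1 1 (by omega) good_one]
  rw [(altB_canon exp.toNat exp le_rfl p).1]
  rw [one_mul, len_eq]
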